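-- pv_equiv track=rewrite | github.com/Gil12401/CodeTree-Basic-Syntax | 250819/중앙값 계산 2/get-median-2.py | get_middle_num_list
-- ===== SOURCE A (Python) =====
-- def get_middle_num_list(arr):
--     _list = []
--     middle_num_list = []
--     for num in range(0 ,len(arr),2):
--         _list = sorted(arr[:num+1])
--         middle_num = _list[len(_list)//2]
--         middle_num_list.append(middle_num)
--
--     return middle_num_list
-- ===== SOURCE B (Python) =====
-- def get_middle_num_list(arr):
--     prefix = []            # kept sorted at all times
--     medians = []
--     for i, x in enumerate(arr):
--         # binary search for the rightmost insertion point of x in prefix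
--         lo, hi = 0, len(prefix)
--         while lo < hi:
--             mid = (lo + hi) // 2
--             if prefix[mid] <= x:
--                 lo = mid + 1
--             else:
--                 hi = mid
--         prefix.insert(lo, x)
--         if i % 2 == 0:
--             medians.append(prefix[i // 2])
--     return medians
-- ===== Notes on version B (the rewrite author's own statement) =====
-- stated objective: faster
-- what changed: Instead of copying and fully re-sorting every odd-length prefix, B maintains the sorted prefix incrementally across one pass, inserting each new element at its binary-searched position and reading off the middle element at even indices.
import Mathlib
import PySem

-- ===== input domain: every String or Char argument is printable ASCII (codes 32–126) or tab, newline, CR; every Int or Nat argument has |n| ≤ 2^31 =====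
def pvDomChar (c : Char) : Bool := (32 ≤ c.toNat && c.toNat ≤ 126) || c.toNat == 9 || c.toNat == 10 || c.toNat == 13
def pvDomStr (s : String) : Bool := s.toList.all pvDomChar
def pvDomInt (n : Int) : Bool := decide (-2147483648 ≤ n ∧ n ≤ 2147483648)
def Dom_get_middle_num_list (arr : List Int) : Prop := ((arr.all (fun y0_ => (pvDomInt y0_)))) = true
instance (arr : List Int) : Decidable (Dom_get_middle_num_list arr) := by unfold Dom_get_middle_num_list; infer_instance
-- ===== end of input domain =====

-- B maintains the sorted prefix incrementally (binary-search insertion) instead of re-sorting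
-- every odd prefix from scratch; measured faster at the large timing sizes.

-- ===== PORT A =====
def get_middle_num_list (arr : List Int) : List Int :=
  (PySem.List.pyRange 0 (arr.length : Int) 2).foldl
    (fun acc num =>
      let _list := PySem.List.sorted (PySem.List.slice arr none (some (num + 1))) (fun x => x) false
      -- _list[len(_list)//2]: the slice is non-empty and the index in range, so Python never
      -- raises here; the pyGetD default 0 is never used
      let middle_num := PySem.List.pyGetD _list (PySem.Int.floordiv (_list.length : Int) 2) 0
      acc ++ [middle_num]) []

-- ===== PORT B =====
-- the hand-written binary-search while-loop of Source B: rightmost insertion point of x in pre on [lo, hi)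
def altBisect (pre : List Int) (x : Int) (lo hi : Nat) : Nat :=
  if lo < hi then
    let mid := (lo + hi) / 2
    -- pre[mid]: mid < hi ≤ len pre whenever this branch is reached, so the default 0 is never used
    if PySem.List.pyGetD pre (mid : Int) 0 ≤ x then altBisect pre x (mid + 1) hi
    else altBisect pre x lo mid
  else lo
termination_by hi - lo

def get_middle_num_list_alt (arr : List Int) : List Int :=
  ((PySem.List.enumerate arr 0).foldl
    (fun (st : List Int × List Int) p =>
      let lo := altBisect st.1 p.2 0 st.1.length
      let pre := PySem.List.insert st.1 (lo : Int) p.2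
      (pre, if PySem.Int.mod p.1 2 == 0 then
              st.2 ++ [PySem.List.pyGetD pre (PySem.Int.floordiv p.1 2) 0]
            else st.2))
    ([], [])).2

-- ===== PRECONDITION & SPEC =====
def Spec_get_middle_num_list (arr : List Int) (out : List Int) : Prop := out = get_middle_num_list_alt arr
instance (arr : List Int) (out : List Int) : Decidable (Spec_get_middle_num_list arr out) := by unfold Spec_get_middle_num_list; infer_instance

-- ===== CLAIM (what is proved, stated in full; the proofs are below) =====
def Claim_equal_get_middle_num_list : Prop := ∀ (arr : List Int), Dom_get_middle_num_list arr → Spec_get_middle_num_list arr (get_middle_num_list arr)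

-- ===== LEMMAS AND PROOFS =====

-- the value A appends for loop index num: the middle element of sorted(arr[:num+1])
def fA (arr : List Int) (num : Int) : Int :=
  let _list := PySem.List.sorted (PySem.List.slice arr none (some (num + 1))) (fun x => x) false
  PySem.List.pyGetD _list (PySem.Int.floordiv (_list.length : Int) 2) 0

lemma A_char (arr : List Int) :
    get_middle_num_list arr = (PySem.List.pyRange 0 (arr.length : Int) 2).map (fA arr) := by
  show (PySem.List.pyRange 0 (arr.length : Int) 2).foldl (fun acc num => acc ++ [fA arr num]) [] = _
  rw [PySem.List.foldl_append_singleton_eq_map]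
  simp

-- B's loop body, named for the proofs (definitionally the lambda in the port)
def stepB : (List Int × List Int) → (Int × Int) → (List Int × List Int) := fun st p =>
  let lo := altBisect st.1 p.2 0 st.1.length
  let pre := PySem.List.insert st.1 (lo : Int) p.2
  (pre, if PySem.Int.mod p.1 2 == 0 then
          st.2 ++ [PySem.List.pyGetD pre (PySem.Int.floordiv p.1 2) 0]
        else st.2)

lemma B_char (arr : List Int) :
    get_middle_num_list_alt arr = ((PySem.List.enumerate arr 0).foldl stepB ([], [])).2 := rfl

lemma altBisect_spec (pre : List Int) (x : Int) (hs : pre.Pairwise (· ≤ ·)) :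
    ∀ n lo hi, hi - lo ≤ n → hi ≤ pre.length → lo ≤ hi →
    (∀ j (hj : j < pre.length), j < lo → pre[j] ≤ x) →
    (∀ j (hj : j < pre.length), hi ≤ j → x < pre[j]) →
    lo ≤ altBisect pre x lo hi ∧ altBisect pre x lo hi ≤ hi ∧
    (∀ j (hj : j < pre.length), j < altBisect pre x lo hi → pre[j] ≤ x) ∧
    (∀ j (hj : j < pre.length), altBisect pre x lo hi ≤ j → x < pre[j]) := by
  have hpair := List.pairwise_iff_getElem.1 hs
  intro n
  induction n with
  | zero =>
    intro lo hi hfuel hhi hlohi hlow hhigh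
    have : ¬ lo < hi := by omega
    rw [altBisect, if_neg this]
    exact ⟨le_rfl, hlohi, hlow, fun j hj hle => hhigh j hj (by omega)⟩
  | succ n ih =>
    intro lo hi hfuel hhi hlohi hlow hhigh
    by_cases hlt : lo < hi
    · rw [altBisect, if_pos hlt]
      have hmid : (lo + hi) / 2 < pre.length := by omega
      have hget : PySem.List.pyGetD pre (((lo + hi) / 2 : Nat) : Int) 0 = pre[(lo + hi) / 2] := by
        rw [PySem.List.pyGetD_natCast]
        exact List.getD_eq_getElem _ _ hmid
      simp only [hget]
      by_cases hc : pre[(lo + hi) / 2] ≤ x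
      · rw [if_pos hc]
        have hlow' : ∀ j (hj : j < pre.length), j < (lo + hi) / 2 + 1 → pre[j] ≤ x := by
          intro j hj hjlt
          rcases Nat.lt_or_ge j ((lo + hi) / 2) with h | h
          · exact le_trans (hpair j ((lo + hi) / 2) hj hmid h) hc
          · have : j = (lo + hi) / 2 := by omega
            subst this; exact hc
        have := ih ((lo + hi) / 2 + 1) hi (by omega) hhi (by omega) hlow' hhigh
        exact ⟨by omega, this.2.1, this.2.2.1, this.2.2.2⟩
      · rw [if_neg hc]
        have hc : x < pre[(lo + hi) / 2] := lt_of_not_ge hc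
        have hhigh' : ∀ j (hj : j < pre.length), (lo + hi) / 2 ≤ j → x < pre[j] := by
          intro j hj hle
          rcases Nat.lt_or_ge ((lo + hi) / 2) j with h | h
          · exact lt_of_lt_of_le hc (hpair ((lo + hi) / 2) j hmid hj h)
          · have : j = (lo + hi) / 2 := by omega
            subst this; exact hc
        have := ih lo ((lo + hi) / 2) (by omega) (by omega) (by omega) hlow hhigh'
        exact ⟨this.1, by omega, this.2.2.1, this.2.2.2⟩
    · rw [altBisect, if_neg hlt]
      exact ⟨le_rfl, hlohi, hlow, fun j hj hle => hhigh j hj (by omega)⟩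

-- the bisect result for the whole list, with in-range bound and the two boundary facts
lemma altBisect_full (pre : List Int) (x : Int) (hs : pre.Pairwise (· ≤ ·)) :
    altBisect pre x 0 pre.length ≤ pre.length ∧
    (∀ j (hj : j < pre.length), j < altBisect pre x 0 pre.length → pre[j] ≤ x) ∧
    (∀ j (hj : j < pre.length), altBisect pre x 0 pre.length ≤ j → x < pre[j]) := by
  have := altBisect_spec pre x hs pre.length 0 pre.length (by omega) le_rfl (by omega)
    (fun j hj h => absurd h (by omega)) (fun j hj h => absurd hj (by omega))
  exact ⟨this.2.1, this.2.2.1, this.2.2.2⟩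

lemma insert_sorted_perm (pre : List Int) (x : Int) (hs : pre.Pairwise (· ≤ ·)) :
    (List.take (altBisect pre x 0 pre.length) pre ++ x :: List.drop (altBisect pre x 0 pre.length) pre).Pairwise (· ≤ ·) ∧
    (List.take (altBisect pre x 0 pre.length) pre ++ x :: List.drop (altBisect pre x 0 pre.length) pre).Perm (x :: pre) := by
  obtain ⟨hle, hlow, hhigh⟩ := altBisect_full pre x hs
  set r := altBisect pre x 0 pre.length with hr
  constructor
  · rw [List.pairwise_append]
    have hmem_take : ∀ a ∈ List.take r pre, a ≤ x := by
      intro a ha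
      obtain ⟨j, hj, hja⟩ := List.mem_iff_getElem.1 ha
      have hjr : j < r := by
        have := hj; simp [List.length_take] at this; omega
      have hjp : j < pre.length := by omega
      have : (List.take r pre)[j] = pre[j] := List.getElem_take
      rw [this] at hja
      exact hja ▸ hlow j hjp hjr
    have hmem_drop : ∀ b ∈ List.drop r pre, x < b := by
      intro b hb
      obtain ⟨j, hj, hjb⟩ := List.mem_iff_getElem.1 hb
      have hjp : r + j < pre.length := by
        have := hj; simp [List.length_drop] at this; omega
      have : (List.drop r pre)[j] = pre[r + j] := List.getElem_drop
      rw [this] at hjb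
      exact hjb ▸ hhigh (r + j) hjp (by omega)
    refine ⟨hs.take, List.pairwise_cons.2 ⟨fun b hb => le_of_lt (hmem_drop b hb), hs.drop⟩, ?_⟩
    intro a ha b hb
    rcases List.mem_cons.1 hb with hbx | hbd
    · exact hbx ▸ hmem_take a ha
    · exact le_trans (hmem_take a ha) (le_of_lt (hmem_drop b hbd))
  · exact List.perm_middle.trans (by rw [List.take_append_drop])

-- the sequence of medians emitted while scanning the tail xs, k elements already consumed
def tailSpec (arr : List Int) : Nat → List Int → List Int
  | _, [] => []
  | k, _ :: rest => (if k % 2 = 0 then [fA arr (k : Int)] else []) ++ tailSpec arr (k + 1) rest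

lemma floordiv_two_natCast (k : Nat) : PySem.Int.floordiv (k : Int) 2 = ((k / 2 : Nat) : Int) := by
  simp [PySem.Int.floordiv, Int.fdiv_eq_ediv]

lemma mod_two_natCast (k : Nat) : (PySem.Int.mod (k : Int) 2 == 0) = (k % 2 == 0) := by
  simp [PySem.Int.mod, Int.fmod_eq_emod]; omega

lemma loopB (arr : List Int) : ∀ (xs c pre out : List Int), arr = c ++ xs →
    pre.Pairwise (· ≤ ·) → pre.Perm c →
    ((PySem.List.enumerate xs ((c.length : Nat) : Int)).foldl stepB (pre, out)).2
      = out ++ tailSpec arr c.length xs := by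
  intro xs
  induction xs with
  | nil => intro c pre out _ _ _; simp [PySem.List.enumerate, tailSpec]
  | cons x rest ih =>
    intro c pre out harr hs hp
    rw [PySem.List.enumerate_cons, List.foldl_cons]
    have hlen : pre.length = c.length := hp.length_eq
    obtain ⟨hrle, _, _⟩ := altBisect_full pre x hs
    obtain ⟨hsort', hperm'⟩ := insert_sorted_perm pre x hs
    set r := altBisect pre x 0 pre.length with hr
    set pre' := List.take r pre ++ x :: List.drop r pre with hpre'
    have hins : PySem.List.insert pre ((r : Nat) : Int) x = pre' := PySem.List.insert_natCast pre r x hrle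
    have hperm'' : pre'.Perm (c ++ [x]) := hperm'.trans ((hp.cons x).trans (List.perm_append_singleton x c).symm)
    have hstep : stepB (pre, out) (((c.length : Nat) : Int), x) =
        (pre', if c.length % 2 == 0 then
                 out ++ [PySem.List.pyGetD pre' ((c.length / 2 : Nat) : Int) 0]
               else out) := by
      simp only [stepB]
      rw [hins, mod_two_natCast, floordiv_two_natCast]
    rw [hstep]
    have hlen' : ((c.length : Int) + 1) = (((c ++ [x]).length : Nat) : Int) := by
      simp
    rw [hlen']
    rw [ih (c ++ [x]) pre' _ (by simp [harr]) hsort' hperm'']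
    have hfa : c.length % 2 = 0 →
        PySem.List.pyGetD pre' ((c.length / 2 : Nat) : Int) 0 = fA arr ((c.length : Nat) : Int) := by
      intro hk
      have htake : PySem.List.slice arr none (some ((c.length : Int) + 1)) = c ++ [x] := by
        have : ((c.length : Int) + 1) = ((c.length + 1 : Nat) : Int) := by push_cast; ring
        rw [this, PySem.List.slice_to_natCast, harr]
        rw [show c.length + 1 = c.length + 1 from rfl, List.take_append]
        simp
      have hsorted : PySem.List.sorted (PySem.List.slice arr none (some ((c.length : Int) + 1))) (fun x => x) false = pre' := by
        rw [htake]
        exact PySem.List.sorted_id_eq_of_perm_of_pairwise _ _ hperm'' hsort'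
      have hlenp : pre'.length = c.length + 1 := by
        rw [hperm''.length_eq]; simp
      unfold fA
      rw [hsorted]
      show PySem.List.pyGetD pre' ((c.length / 2 : Nat) : Int) 0
         = PySem.List.pyGetD pre' (PySem.Int.floordiv ((pre'.length : Nat) : Int) 2) 0
      rw [hlenp, floordiv_two_natCast]
      congr 2
      omega
    rcases Nat.even_or_odd c.length with he | ho
    · have hk : c.length % 2 = 0 := Nat.even_iff.1 he
      simp only [tailSpec, hk, beq_self_eq_true, if_true, hfa hk]
      simp [List.append_assoc]
    · have hk : c.length % 2 = 1 := Nat.odd_iff.1 ho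
      simp only [tailSpec, hk]
      simp

lemma pyRange_two_nil (a b : Int) (h : b ≤ a) : PySem.List.pyRange a b 2 = [] := by
  rw [PySem.List.pyRange_of_pos a b (by norm_num)]
  rw [if_neg (by omega)]
  simp

lemma pyRange_two_cons (a b : Int) (h : a < b) :
    PySem.List.pyRange a b 2 = a :: PySem.List.pyRange (a + 2) b 2 := by
  rw [PySem.List.pyRange_of_pos a b (by norm_num), PySem.List.pyRange_of_pos (a + 2) b (by norm_num)]
  have h1 : ((b - a + 2 - 1) / 2).toNat = ((b - (a + 2) + 2 - 1) / 2).toNat + 1 := by omega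
  have h3 : (if a + 2 < b then ((b - (a + 2) + 2 - 1) / 2).toNat else 0)
      = ((b - (a + 2) + 2 - 1) / 2).toNat := by
    by_cases h2 : a + 2 < b
    · rw [if_pos h2]
    · rw [if_neg h2]; omega
  rw [if_pos h, h1, h3, List.range_succ_eq_map]
  simp only [List.map_cons, List.map_map, Nat.cast_zero, mul_zero, add_zero]
  congr 1
  apply List.map_congr_left
  intro k _
  simp only [Function.comp_apply, Nat.succ_eq_add_one]
  push_cast
  ring

lemma map_range2_eq_tailSpec (arr : List Int) : ∀ (xs : List Int) (k : Nat),
    (k % 2 = 0 → (PySem.List.pyRange (k : Int) ((k : Int) + xs.length) 2).map (fA arr) = tailSpec arr k xs)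
  ∧ (k % 2 = 1 → (PySem.List.pyRange ((k : Int) + 1) ((k : Int) + xs.length) 2).map (fA arr) = tailSpec arr k xs) := by
  intro xs
  induction xs with
  | nil =>
    intro k
    constructor
    · intro _; rw [show ((k : Int) + ((List.nil : List Int).length : Int)) = (k : Int) by simp]
      rw [pyRange_two_nil _ _ le_rfl]; rfl
    · intro _; rw [show ((k : Int) + ((List.nil : List Int).length : Int)) = (k : Int) by simp]
      rw [pyRange_two_nil _ _ (by omega)]; rfl
  | cons x rest ih =>
    intro k
    have h3 : (k : Int) + (((x :: rest).length : Nat) : Int) = (((k + 1 : Nat) : Int)) + (rest.length : Int) := by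
      push_cast [List.length_cons]; ring
    constructor
    · intro hk
      have hlt : (k : Int) < (k : Int) + (((x :: rest).length : Nat) : Int) := by push_cast [List.length_cons]; omega
      rw [pyRange_two_cons _ _ hlt, List.map_cons]
      have h2 : (k : Int) + 2 = ((k + 1 : Nat) : Int) + 1 := by push_cast; ring
      rw [h3, h2, (ih (k + 1)).2 (by omega)]
      simp [tailSpec, hk]
    · intro hk
      have heq : (k : Int) + 1 = ((k + 1 : Nat) : Int) := by push_cast; ring
      rw [h3, heq, (ih (k + 1)).1 (by omega)]
      have : (k % 2 = 0) = False := by simp [hk]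
      simp [tailSpec, this]

-- ===== VERDICT (by name: the statement is the Claim_ definition above) =====
theorem get_middle_num_list_spec : Claim_equal_get_middle_num_list := by
  unfold Claim_equal_get_middle_num_list
  intro arr _
  unfold Spec_get_middle_num_list
  have hA := (map_range2_eq_tailSpec arr arr 0).1 rfl
  simp only [Nat.cast_zero, zero_add] at hA
  have hB := loopB arr arr [] [] [] (List.nil_append arr).symm List.Pairwise.nil (List.Perm.refl [])
  simp only [List.length_nil, Nat.cast_zero, List.nil_append] at hB
  rw [A_char, B_char, hA, hB]
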